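-- pv_equiv track=rewrite | github.com/AmerZakret/Key-Generator | Key Generator/collatz.py | goreceli_kaotik_pencere
-- ===== SOURCE A (Python) =====
-- def goreceli_kaotik_pencere(dizi):
--     """
--     Collatz dizisinin sonundaki tamamen monoton azalan
--     deterministik kuyruğu otomatik olarak keser.
--     """
--     if len(dizi) < 2:
--         return dizi
--
--     kesme_indeksi = len(dizi) - 1
--
--     # sondan başa doğru git
--     for i in range(len(dizi) - 1, 0, -1):
--         if dizi[i] < dizi[i - 1]:
--             kesme_indeksi = i - 1
--         else:
--             break
--
--     return dizi[:kesme_indeksi + 1]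
-- ===== SOURCE B (Python) =====
-- def goreceli_kaotik_pencere(dizi):
--     # Single forward pass: remember the last index where the step is
--     # non-decreasing; everything after it is the strictly-decreasing tail.
--     if len(dizi) < 2:
--         return dizi
--     kesme = 0
--     for i in range(1, len(dizi)):
--         if dizi[i] >= dizi[i - 1]:
--             kesme = i
--     return dizi[:kesme + 1]
-- ===== Notes on version B (the rewrite author's own statement) =====
-- stated objective: alternative
-- what changed: Replaces A's backward scan with early break (tracking decreasing steps from the end) by a single forward pass that records the last non-decreasing step index and slices there.
import Mathlib
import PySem

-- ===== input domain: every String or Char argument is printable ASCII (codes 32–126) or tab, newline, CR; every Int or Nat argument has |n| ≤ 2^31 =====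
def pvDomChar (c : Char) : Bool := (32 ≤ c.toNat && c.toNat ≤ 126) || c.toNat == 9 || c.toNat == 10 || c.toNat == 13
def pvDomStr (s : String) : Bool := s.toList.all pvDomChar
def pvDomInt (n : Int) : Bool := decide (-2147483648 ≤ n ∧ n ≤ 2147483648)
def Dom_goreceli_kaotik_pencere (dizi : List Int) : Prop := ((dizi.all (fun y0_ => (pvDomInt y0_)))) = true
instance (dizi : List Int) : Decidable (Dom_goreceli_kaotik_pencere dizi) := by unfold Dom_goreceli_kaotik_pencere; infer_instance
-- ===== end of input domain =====

-- B replaces A's backward break-scan by a single forward pass recording the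
-- last non-decreasing step index (objective: alternative decomposition).

-- ===== PORT A =====
-- A's backward loop 'for i in range(len-1, 0, -1)' with break: processes index i,
-- updates kesme := i-1 while dizi[i] < dizi[i-1], breaks (returns current kesme) otherwise.
-- In-range indexing dizi[i] is ported as getD i 0 (i < length always holds here).
def pvALoop (dizi : List Int) : Nat → Nat → Nat
  | 0, kesme => kesme
  | i + 1, kesme =>
    if dizi.getD (i + 1) 0 < dizi.getD i 0 then pvALoop dizi i i
    else kesme

def goreceli_kaotik_pencere (dizi : List Int) : List Int :=
  if dizi.length < 2 then dizi
  else
    let kesme := pvALoop dizi (dizi.length - 1) (dizi.length - 1)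
    dizi.take (kesme + 1)   -- dizi[:kesme+1], kesme+1 ≥ 0: slice = take

-- ===== PORT B =====
def goreceli_kaotik_pencere_alt (dizi : List Int) : List Int :=
  if dizi.length < 2 then dizi
  else
    let kesme := (List.range' 1 (dizi.length - 1)).foldl
      (fun k i => if dizi.getD (i - 1) 0 ≤ dizi.getD i 0 then i else k) 0
    dizi.take (kesme + 1)   -- dizi[:kesme+1], kesme+1 ≥ 0: slice = take

-- ===== PRECONDITION & SPEC =====
def Spec_goreceli_kaotik_pencere (dizi : List Int) (out : List Int) : Prop := out = goreceli_kaotik_pencere_alt dizi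
instance (dizi : List Int) (out : List Int) : Decidable (Spec_goreceli_kaotik_pencere dizi out) := by unfold Spec_goreceli_kaotik_pencere; infer_instance

-- ===== CLAIM (what is proved, stated in full; the proofs are below) =====
def Claim_equal_goreceli_kaotik_pencere : Prop := ∀ (dizi : List Int), Dom_goreceli_kaotik_pencere dizi → Spec_goreceli_kaotik_pencere dizi (goreceli_kaotik_pencere dizi)

-- ===== LEMMAS AND PROOFS =====

-- Both loops compute the largest i in [1, m] with dizi[i-1] ≤ dizi[i] (0 if none):
-- A's backward break-scan invariantly carries kesme = current index.
theorem pvLoop_eq (dizi : List Int) (m : Nat) :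
    pvALoop dizi m m =
      (List.range' 1 m).foldl
        (fun k i => if dizi.getD (i - 1) 0 ≤ dizi.getD i 0 then i else k) 0 := by
  induction m with
  | zero => simp [pvALoop]
  | succ i ih =>
    rw [List.range'_1_concat, List.foldl_append]
    simp only [List.foldl_cons, List.foldl_nil, pvALoop]
    rw [show 1 + i = i + 1 from by omega]
    simp only [Nat.add_sub_cancel]
    rcases lt_or_ge (dizi.getD (i + 1) 0) (dizi.getD i 0) with h | h
    · rw [if_pos h, if_neg (by omega), ih]
    · rw [if_neg (by omega), if_pos h]

-- ===== VERDICT (by name: the statement is the Claim_ definition above) =====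
theorem goreceli_kaotik_pencere_spec : Claim_equal_goreceli_kaotik_pencere := by
  intro dizi _
  unfold Spec_goreceli_kaotik_pencere goreceli_kaotik_pencere goreceli_kaotik_pencere_alt
  split
  · rfl
  · rw [pvLoop_eq]
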